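-- pv_equiv track=rewrite | github.com/akash1601/algorithms_leetcode_solution | solutions/hackerCards.py | hackerCards
-- ===== SOURCE A (Python) =====
-- def hackerCards(collection,d):
--
--     total=0
--
--     lis=[]
--
--     for i in range(1,d+1):
--         if i not in collection:
--             if(total+i<=d):
--                 lis.append(i)
--                 #updating total by adding current value of i
--                 total+=i
--
--     return lis
-- ===== SOURCE B (Python) =====
-- def hackerCards(collection, d):
--     # Different algorithm: candidates by set difference, then binary search
--     # for the largest count k whose cheapest-k total fits the budget.
--     # Correct because candidates are strictly increasing positive ints, so
--     # the predicate sum(cands[:k]) <= d is monotone in k, and A's loop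
--     # (never breaking, but never able to accept after one rejection since
--     # values only grow) returns exactly the longest affordable prefix.
--     cands = sorted(set(range(1, d + 1)) - set(collection))
--     lo, hi = 0, len(cands)
--     while lo < hi:
--         mid = (lo + hi + 1) // 2
--         if sum(cands[:mid]) <= d:
--             lo = mid
--         else:
--             hi = mid - 1
--     return cands[:lo]
-- ===== Notes on version B (the rewrite author's own statement) =====
-- stated objective: faster
-- what changed: Replaces A's greedy running-total loop (with a linear 'i not in collection' scan per step) by a set-difference candidate construction followed by a binary search over the count k of taken cards (monotone predicate sum(cands[:k]) <= d), returning cands[:k].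
import Mathlib
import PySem

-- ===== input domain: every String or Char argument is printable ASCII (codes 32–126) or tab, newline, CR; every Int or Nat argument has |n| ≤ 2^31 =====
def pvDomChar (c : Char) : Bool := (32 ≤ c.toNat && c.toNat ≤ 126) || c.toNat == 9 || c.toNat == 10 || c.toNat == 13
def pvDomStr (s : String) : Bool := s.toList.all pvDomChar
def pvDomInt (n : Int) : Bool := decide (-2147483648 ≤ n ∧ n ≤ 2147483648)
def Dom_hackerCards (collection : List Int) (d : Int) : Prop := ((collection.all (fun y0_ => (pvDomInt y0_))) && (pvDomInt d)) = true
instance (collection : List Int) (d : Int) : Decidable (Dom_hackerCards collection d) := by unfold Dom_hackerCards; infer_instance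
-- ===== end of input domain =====

-- B replaces A's greedy running-total loop by set-difference candidates plus a binary
-- search over the number of cards taken (alternative algorithm, similar cost).

-- ===== PORT A =====
def hackerCards (collection : List Int) (d : Int) : List Int :=
  ((PySem.List.pyRange 1 (d + 1) 1).foldl
    (fun (st : Int × List Int) i =>
      if !collection.contains i then
        if st.1 + i ≤ d then (st.1 + i, st.2 ++ [i]) else st
      else st)
    (0, [])).2

-- ===== PORT B =====
-- Source B's while-loop: binary search for the largest k with sum(cands[:k]) ≤ d
-- (structural recursion on a fuel bound ≥ hi - lo, a totality guard only)
def pvBS (cands : List Int) (d : Int) : Nat → Int → Int → Int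
  | 0, lo, _ => lo
  | fuel + 1, lo, hi =>
    if lo < hi then
      let mid := PySem.Int.floordiv (lo + hi + 1) 2
      if (PySem.List.slice cands none (some mid)).sum ≤ d then pvBS cands d fuel mid hi
      else pvBS cands d fuel lo (mid - 1)
    else lo

def hackerCards_alt (collection : List Int) (d : Int) : List Int :=
  let cands := PySem.List.sorted
    (PySem.Set.diff (PySem.Set.ofList (PySem.List.pyRange 1 (d + 1) 1))
                    (PySem.Set.ofList collection)) (fun x => x)
  let lo := pvBS cands d cands.length 0 (cands.length : Int)
  PySem.List.slice cands none (some lo)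

-- ===== PRECONDITION & SPEC =====
def Spec_hackerCards (collection : List Int) (d : Int) (out : List Int) : Prop := out = hackerCards_alt collection d
instance (collection : List Int) (d : Int) (out : List Int) : Decidable (Spec_hackerCards collection d out) := by unfold Spec_hackerCards; infer_instance

-- ===== CLAIM (what is proved, stated in full; the proofs are below) =====
def Claim_equal_hackerCards : Prop := ∀ (collection : List Int) (d : Int), Dom_hackerCards collection d → Spec_hackerCards collection d (hackerCards collection d)

-- ===== LEMMAS AND PROOFS =====

-- A's loop restated recursively (the appended part of the list)
def pvGreedy (collection : List Int) (d : Int) : Int → List Int → List Int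
  | _, [] => []
  | t, x :: xs =>
    if !collection.contains x then
      if t + x ≤ d then x :: pvGreedy collection d (t + x) xs
      else pvGreedy collection d t xs
    else pvGreedy collection d t xs

-- the same greedy on an already-filtered candidate list
def pvGT (d : Int) : Int → List Int → List Int
  | _, [] => []
  | t, x :: xs => if t + x ≤ d then x :: pvGT d (t + x) xs else pvGT d t xs

theorem pvFoldl_eq_greedy (collection : List Int) (d : Int) :
    ∀ (ys : List Int) (t : Int) (acc : List Int),
      (ys.foldl
        (fun (st : Int × List Int) i =>
          if !collection.contains i then
            if st.1 + i ≤ d then (st.1 + i, st.2 ++ [i]) else st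
          else st)
        (t, acc)).2 = acc ++ pvGreedy collection d t ys := by
  intro ys
  induction ys with
  | nil => intro t acc; simp [pvGreedy]
  | cons x xs ih =>
    intro t acc
    simp only [List.foldl_cons, pvGreedy]
    by_cases hc : x ∈ collection
    · simpa [hc] using ih t acc
    · by_cases hle : t + x ≤ d
      · simpa [hc, hle] using ih (t + x) (acc ++ [x])
      · simpa [hc, hle] using ih t acc

theorem pvGreedy_eq_gt_filter (collection : List Int) (d : Int) :
    ∀ (ys : List Int) (t : Int),
      pvGreedy collection d t ys = pvGT d t (ys.filter (fun i => !collection.contains i)) := by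
  intro ys
  induction ys with
  | nil => intro t; rfl
  | cons x xs ih =>
    intro t
    simp only [pvGreedy, List.filter_cons]
    by_cases hc : x ∈ collection
    · simp [hc, ih t]
    · by_cases hle : t + x ≤ d <;> simp [hc, hle, pvGT, ih]

theorem pvGT_nil (d : Int) :
    ∀ (xs : List Int) (t : Int), (∀ y ∈ xs, d < t + y) → pvGT d t xs = [] := by
  intro xs
  induction xs with
  | nil => intro t _; rfl
  | cons x xs ih =>
    intro t h
    have hx : d < t + x := h x (by simp)
    simp only [pvGT, not_le.mpr hx, if_false]
    exact ih t (fun y hy => h y (by simp [hy]))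

-- the greedy on a sorted positive list is "take k" for any k satisfying the
-- longest-affordable-prefix characterisation
theorem pvGT_eq_take (d : Int) :
    ∀ (xs : List Int) (t : Int) (k : Nat), xs.Pairwise (· ≤ ·) → (∀ y ∈ xs, 0 < y) →
      k ≤ xs.length → t + (xs.take k).sum ≤ d →
      (k = xs.length ∨ ¬ (t + (xs.take (k + 1)).sum ≤ d)) →
      pvGT d t xs = xs.take k := by
  intro xs
  induction xs with
  | nil => intro t k _ _ _ _ _; simp [pvGT]
  | cons x xs ih =>
    intro t k hsort hpos hk hsum hmax
    have hx : 0 < x := hpos x (by simp)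
    have hxle : ∀ y ∈ xs, x ≤ y := fun y hy => (List.pairwise_cons.mp hsort).1 y hy
    match k with
    | 0 =>
      have hfail : ¬ (t + x ≤ d) := by
        rcases hmax with h | h
        · simp at h
        · simpa using h
      simp only [pvGT, hfail, if_false, List.take_zero]
      exact pvGT_nil d xs t (fun y hy => by have := hxle y hy; omega)
    | k + 1 =>
      have hsum' : t + x + (xs.take k).sum ≤ d := by
        simpa [List.take_succ_cons, add_assoc] using hsum
      have htx : t + x ≤ d := by
        have : (0:Int) ≤ (xs.take k).sum :=
          List.sum_nonneg (fun y hy => le_of_lt (hpos y (by simp [List.mem_of_mem_take hy])))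
        omega
      simp only [pvGT, htx, if_true, List.take_succ_cons]
      have hmax' : k = xs.length ∨ ¬ (t + x + (xs.take (k + 1)).sum ≤ d) := by
        rcases hmax with h | h
        · left; simpa using h
        · right; intro hcon; exact h (by simpa [List.take_succ_cons, add_assoc] using hcon)
      rw [ih (t + x) k hsort.of_cons (fun y hy => hpos y (by simp [hy]))
        (by simpa using hk) hsum' hmax']

-- the binary search returns a k with the longest-affordable-prefix characterisation
theorem pvBS_spec (cands : List Int) (d : Int) :
    ∀ (n : Nat) (lo hi : Int), (hi - lo).toNat ≤ n →
      0 ≤ lo → lo ≤ hi → hi ≤ (cands.length : Int) →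
      (cands.take lo.toNat).sum ≤ d →
      (hi < (cands.length : Int) → ¬ (cands.take (hi.toNat + 1)).sum ≤ d) →
      let k := pvBS cands d n lo hi
      0 ≤ k ∧ k ≤ (cands.length : Int) ∧ (cands.take k.toNat).sum ≤ d ∧
        (k < (cands.length : Int) → ¬ (cands.take (k.toNat + 1)).sum ≤ d) := by
  intro n
  induction n with
  | zero =>
    intro lo hi hfuel h0 hlh hhl hsum hmax
    have : lo = hi := by omega
    subst this
    exact ⟨h0, hlh.trans hhl, hsum, fun h => hmax h⟩
  | succ n ih =>
    intro lo hi hfuel h0 hlh hhl hsum hmax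
    by_cases h : lo < hi
    · simp only [pvBS, h, if_true]
      rw [show lo + hi + 1 = lo + 1 + hi by ring]
      set mid := PySem.Int.floordiv (lo + 1 + hi) 2 with hmiddef
      have hmid := PySem.Int.floordiv_two_mid_bounds (lo := lo + 1) (hi := hi) (by omega)
      rw [← hmiddef] at hmid
      have hslice : PySem.List.slice cands none (some mid) = List.take mid.toNat cands := by
        obtain ⟨m, hm⟩ : ∃ m : ℕ, mid = (m : ℤ) := ⟨mid.toNat, by omega⟩
        rw [hm, PySem.List.slice_to_natCast, Int.toNat_natCast]
      rw [hslice]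
      by_cases hs : (cands.take mid.toNat).sum ≤ d
      · simp only [hs, if_true]
        exact ih mid hi (by omega) (by omega) (by omega) hhl hs hmax
      · simp only [hs, if_false]
        have hm1 : (mid - 1).toNat + 1 = mid.toNat := by omega
        refine ih lo (mid - 1) (by omega) h0 (by omega) (by omega) hsum ?_
        intro _
        rw [hm1]; exact hs
    · simp only [pvBS, h, if_false]
      have : lo = hi := by omega
      subst this
      exact ⟨h0, hlh.trans hhl, hsum, fun hlt => hmax hlt⟩

-- B's candidate list is A's filtered range
theorem pvCands_eq (collection : List Int) (d : Int) :
    PySem.List.sorted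
      (PySem.Set.diff (PySem.Set.ofList (PySem.List.pyRange 1 (d + 1) 1))
                      (PySem.Set.ofList collection)) (fun x => x)
      = (PySem.List.pyRange 1 (d + 1) 1).filter (fun i => !collection.contains i) := by
  have h1 : PySem.Set.ofList (PySem.List.pyRange 1 (d + 1) 1) = PySem.List.pyRange 1 (d + 1) 1 :=
    PySem.Set.ofList_eq_self_of_nodup _ (PySem.List.nodup_pyRange_one 1 (d + 1))
  have h2 : PySem.Set.diff (PySem.List.pyRange 1 (d + 1) 1) (PySem.Set.ofList collection)
      = (PySem.List.pyRange 1 (d + 1) 1).filter (fun i => !collection.contains i) := by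
    unfold PySem.Set.diff
    apply List.filter_congr
    intro x _
    simp [PySem.Set.mem_ofList]
  rw [h1, h2]
  exact PySem.List.sorted_eq_self_of_pairwise _ _
    (((PySem.List.pairwise_lt_pyRange_one 1 (d + 1)).sublist List.filter_sublist).imp le_of_lt)

-- ===== VERDICT (by name: the statement is the Claim_ definition above) =====
theorem hackerCards_spec : Claim_equal_hackerCards := by
  intro collection d _
  unfold Spec_hackerCards
  simp only [hackerCards, hackerCards_alt]
  rw [pvFoldl_eq_greedy, List.nil_append, pvGreedy_eq_gt_filter, pvCands_eq]
  set cands := (PySem.List.pyRange 1 (d + 1) 1).filter (fun i => !collection.contains i) with hcands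
  by_cases hd : d < 1
  · have hnil : cands = [] := by
      rw [hcands, PySem.List.pyRange_one_eq_nil (by omega)]; rfl
    rw [hnil]
    simp [pvGT, pvBS, PySem.List.slice]
  · have hpos : ∀ y ∈ cands, 0 < y := by
      intro y hy
      have := (PySem.List.mem_pyRange_one.mp (List.mem_of_mem_filter hy)).1
      omega
    have hsort : cands.Pairwise (· ≤ ·) :=
      ((PySem.List.pairwise_lt_pyRange_one 1 (d + 1)).sublist List.filter_sublist).imp le_of_lt
    have h0 : (cands.take (0 : Int).toNat).sum ≤ d := by simp; omega
    have hbs := pvBS_spec cands d cands.length 0 (cands.length : Int)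
      (by omega) (le_refl _) (by positivity) (le_refl _) h0 (by intro hlt; omega)
    obtain ⟨hk0, hklen, hksum, hkmax⟩ := hbs
    set k := pvBS cands d cands.length 0 (cands.length : Int) with hkdef
    rw [show k = ((k.toNat : Nat) : Int) by omega, PySem.List.slice_to_natCast]
    apply pvGT_eq_take d cands 0 k.toNat hsort hpos (by omega) (by simpa using hksum)
    by_cases hkl : k < (cands.length : Int)
    · right; simpa using hkmax hkl
    · left; omega
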